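-- pv_equiv track=rewrite | github.com/lz41209073/ownpdf2html | pdf2table/table_structure.py | find_continue_list
-- ===== SOURCE A (Python) =====
-- def find_continue_list(type_list):
--     table_range_list = []
--     if not type_list: return
--     start = 0
--     while start<len(type_list)-1:
--       # pdb.set_trace()
--       if type_list[start] == "c":
--           end = start+1
--           for j in range(start+1,len(type_list)):
--               if type_list[j] == "t":
--                   end = j
--                   if end - start > 1: table_range_list.append([start,end])
--                   break
--           if j == len(type_list)-1:
--               if type_list[j] == "c": table_range_list.append([start,j+1])
--               break
--           start = end
--       start += 1
--     return table_range_list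
-- ===== SOURCE B (Python) =====
-- def find_continue_list(type_list):
--     # single forward pass: a state machine with a pending segment start,
--     # instead of A's while-loop with an inner rescanning for-loop
--     if not type_list:
--         return None
--     n = len(type_list)
--     res = []
--     pending = None
--     for idx, ty in enumerate(type_list):
--         if pending is None:
--             if ty == "c" and idx < n - 1:
--                 pending = idx
--         elif ty == "t":
--             if idx - pending > 1:
--                 res.append([pending, idx])
--             pending = None
--     if pending is not None and type_list[-1] == "c":
--         res.append([pending, n])
--     return res
-- ===== Notes on version B (the rewrite author's own statement) =====
-- stated objective: simpler
-- what changed: Replaced A's while-loop with an inner for-loop that rescans for the next 't' by a single forward pass state machine that carries the pending segment start and does one post-loop fixup.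
import Mathlib
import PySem

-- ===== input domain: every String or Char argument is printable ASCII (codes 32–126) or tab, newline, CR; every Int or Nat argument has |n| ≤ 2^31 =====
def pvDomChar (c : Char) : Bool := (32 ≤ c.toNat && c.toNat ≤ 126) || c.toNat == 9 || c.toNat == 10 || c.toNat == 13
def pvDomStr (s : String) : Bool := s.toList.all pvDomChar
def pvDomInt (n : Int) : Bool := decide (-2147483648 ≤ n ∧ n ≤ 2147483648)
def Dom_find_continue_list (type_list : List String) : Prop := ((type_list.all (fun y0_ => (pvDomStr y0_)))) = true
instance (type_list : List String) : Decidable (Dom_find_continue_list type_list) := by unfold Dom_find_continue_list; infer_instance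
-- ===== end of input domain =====

-- B replaces A's while-loop with an inner rescanning for-loop by a single forward
-- pass state machine carrying the pending segment start (objective: simpler).


-- ===== PORT A =====
-- inner scan (see comment below firstT usage)
def firstT (tl : List String) (i n : Nat) : Option Nat :=
  if i < n then
    (if tl.getD i "" = "t" then some i else firstT tl (i + 1) n)
  else none
termination_by n - i

-- bound needed by the while-loop's termination: the inner scan only returns
-- indices in [i, n)
theorem firstT_bounds (tl : List String) (i n k : Nat)
    (h : firstT tl i n = some k) : i ≤ k ∧ k < n := by
  rw [firstT] at h
  by_cases hi : i < n
  · simp only [hi, if_pos] at h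
    by_cases ht : tl.getD i "" = "t"
    · simp only [ht, if_pos, Option.some.injEq] at h
      omega
    · simp only [ht, if_neg, not_false_iff] at h
      have := firstT_bounds tl (i + 1) n k h
      omega
  · simp [hi] at h
termination_by n - i

-- inner 'for j in range(i, n): if type_list[j] == "t": … break' — returns the first
-- index ≥ i holding "t" (none: the loop ran out, i.e. j ended at n-1 with no break)

-- the while-loop of A; indices are in range whenever read (start+1 < n is the guard),
-- so List.getD is exact here
def loopA (tl : List String) (n : Nat) (start : Nat) (acc : List (List Int)) :
    List (List Int) :=
  if _h : start + 1 < n then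
    if tl.getD start "" = "c" then
      match _hm : firstT tl (start + 1) n with
      | some k =>
        -- t found at j = k: end = k, append when end - start > 1
        let acc' := if k - start > 1 then acc ++ [[(start : Int), (k : Int)]] else acc
        if k = n - 1 then
          -- j == len-1: the trailing type_list[j] == "c" check, then break
          (if tl.getD k "" = "c" then acc' ++ [[(start : Int), ((k : Int) + 1)]] else acc')
        else loopA tl n (k + 1) acc'   -- start = end; start += 1
      | none =>
        -- no break: j == len-1, trailing check, then break
        if tl.getD (n - 1) "" = "c" then acc ++ [[(start : Int), (n : Int)]] else acc
    else loopA tl n (start + 1) acc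
  else acc
termination_by n - start
decreasing_by
  · have := firstT_bounds tl (start + 1) n k _hm; omega
  · omega

def find_continue_list (type_list : List String) : Option (List (List Int)) :=
  if type_list = [] then none
  else some (loopA type_list type_list.length 0 [])

-- ===== PORT B =====
-- the 'for idx, ty in enumerate(type_list)' pass of Source B, carrying (res, pending)
def goB (tl : List String) (n : Nat) (rest : List String) (idx : Nat)
    (res : List (List Int)) (pending : Option Nat) :
    List (List Int) × Option Nat :=
  match rest with
  | [] => (res, pending)
  | ty :: rest' =>
    match pending with
    | none =>
      if ty = "c" ∧ idx + 1 < n then goB tl n rest' (idx + 1) res (some idx)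
      else goB tl n rest' (idx + 1) res none
    | some p =>
      if ty = "t" then
        goB tl n rest' (idx + 1)
          (if idx - p > 1 then res ++ [[(p : Int), (idx : Int)]] else res) none
      else goB tl n rest' (idx + 1) res (some p)

def find_continue_list_alt (type_list : List String) : Option (List (List Int)) :=
  if type_list = [] then none
  else
    let n := type_list.length
    match goB type_list n type_list 0 [] none with
    | (res, none) => some res
    | (res, some p) =>
      some (if type_list.getLastD "" = "c" then res ++ [[(p : Int), (n : Int)]] else res)

-- ===== PRECONDITION & SPEC =====
def Spec_find_continue_list (type_list : List String) (out : Option (List (List Int))) : Prop := out = find_continue_list_alt type_list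
instance (type_list : List String) (out : Option (List (List Int))) : Decidable (Spec_find_continue_list type_list out) := by unfold Spec_find_continue_list; infer_instance

-- ===== CLAIM (what is proved, stated in full; the proofs are below) =====
def Claim_equal_find_continue_list : Prop := ∀ (type_list : List String), Dom_find_continue_list type_list → Spec_find_continue_list type_list (find_continue_list type_list)

-- ===== LEMMAS AND PROOFS =====

-- the post-loop fixup of Source B, as a function of the pass's final state
def finishB (tl : List String) (st : List (List Int) × Option Nat) : List (List Int) :=
  match st.2 with
  | none => st.1
  | some p => if tl.getLastD "" = "c" then st.1 ++ [[(p : Int), (tl.length : Int)]] else st.1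

-- what A computes once it is inside a "c"-segment started at p, scanning from i
def scanA (tl : List String) (n : Nat) (p i : Nat) (acc : List (List Int)) :
    List (List Int) :=
  match _hm : firstT tl i n with
  | some k =>
    let acc' := if k - p > 1 then acc ++ [[(p : Int), (k : Int)]] else acc
    if k = n - 1 then
      (if tl.getD k "" = "c" then acc' ++ [[(p : Int), ((k : Int) + 1)]] else acc')
    else loopA tl n (k + 1) acc'
  | none =>
    if tl.getD (n - 1) "" = "c" then acc ++ [[(p : Int), (n : Int)]] else acc

theorem scanA_some (tl : List String) (n p i : Nat) (acc : List (List Int)) (k : Nat)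
    (h : firstT tl i n = some k) :
    scanA tl n p i acc =
      (if k = n - 1 then
        (if tl.getD k "" = "c" then
          (if k - p > 1 then acc ++ [[(p : Int), (k : Int)]] else acc) ++
            [[(p : Int), ((k : Int) + 1)]]
         else (if k - p > 1 then acc ++ [[(p : Int), (k : Int)]] else acc))
       else loopA tl n (k + 1)
              (if k - p > 1 then acc ++ [[(p : Int), (k : Int)]] else acc)) := by
  unfold scanA
  split
  · next k' heq => rw [h] at heq; injection heq with e; subst e; rfl
  · next heq => rw [h] at heq; simp at heq

theorem scanA_none (tl : List String) (n p i : Nat) (acc : List (List Int))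
    (h : firstT tl i n = none) :
    scanA tl n p i acc =
      (if tl.getD (n - 1) "" = "c" then acc ++ [[(p : Int), (n : Int)]] else acc) := by
  unfold scanA
  split
  · next k' heq => rw [h] at heq; simp at heq
  · next heq => rfl

theorem loopA_c (tl : List String) (n start : Nat) (acc : List (List Int))
    (h : start + 1 < n) (hc : tl.getD start "" = "c") :
    loopA tl n start acc = scanA tl n start (start + 1) acc := by
  conv_lhs => rw [loopA]
  rw [dif_pos h, if_pos hc]
  split
  · next k heq => rw [scanA_some tl n start (start + 1) acc k heq]
  · next heq => rw [scanA_none tl n start (start + 1) acc heq]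

theorem getLastD_eq_getD (tl : List String) (h : tl ≠ []) :
    tl.getLastD "" = tl.getD (tl.length - 1) "" := by
  induction tl with
  | nil => simp at h
  | cons x xs ih =>
    cases xs with
    | nil => simp
    | cons y ys =>
      simp only [List.getLastD_cons, List.length_cons] at *
      rw [ih (by simp)]
      simp [List.getD]
      rfl

-- the main invariant: folding Source B's state machine over the suffix from index i
-- (then fixing up) computes exactly what A computes from that point on
theorem mainInv (tl : List String) (i : Nat) (st : Option Nat)
    (acc : List (List Int)) (hne : tl ≠ []) :
    finishB tl (goB tl tl.length (tl.drop i) i acc st) =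
      (match st with
       | none => loopA tl tl.length i acc
       | some p => scanA tl tl.length p i acc) := by
  by_cases hi : i < tl.length
  · rw [List.drop_eq_getElem_cons hi]
    have hget : tl.getD i "" = tl[i] := List.getD_eq_getElem tl "" hi
    match st with
    | none =>
      by_cases h1 : i + 1 < tl.length
      · by_cases hc : tl[i] = "c"
        · rw [goB, if_pos (show tl[i] = "c" ∧ i + 1 < tl.length from ⟨hc, h1⟩)]
          rw [mainInv tl (i + 1) (some i) acc hne]
          dsimp only
          exact (loopA_c tl tl.length i acc h1 (hget.trans hc)).symm
        · rw [goB, if_neg (by simp [hc])]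
          rw [mainInv tl (i + 1) none acc hne]
          dsimp only
          conv_rhs => rw [loopA]
          rw [dif_pos h1, if_neg (by rw [hget]; exact hc)]
      · rw [goB, if_neg (by simp [h1])]
        rw [mainInv tl (i + 1) none acc hne]
        dsimp only
        conv_lhs => rw [loopA]
        rw [dif_neg (show ¬ (i + 1 + 1 < tl.length) from by omega)]
        conv_rhs => rw [loopA]
        rw [dif_neg h1]
    | some p =>
      by_cases ht : tl[i] = "t"
      · have hf : firstT tl i tl.length = some i := by
          rw [firstT, if_pos hi, if_pos (hget.trans ht)]
        rw [goB, if_pos ht]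
        rw [mainInv tl (i + 1) none _ hne]
        dsimp only
        rw [scanA_some tl tl.length p i acc i hf]
        by_cases hk : i = tl.length - 1
        · rw [if_pos hk]
          rw [if_neg (show ¬ tl.getD i "" = "c" from by rw [hget, ht]; decide)]
          conv_lhs => rw [loopA]
          rw [dif_neg (show ¬ (i + 1 + 1 < tl.length) from by omega)]
        · rw [if_neg hk]
      · have hstep : firstT tl i tl.length = firstT tl (i + 1) tl.length := by
          rw [firstT, if_pos hi, if_neg (by rw [hget]; exact ht)]
        rw [goB, if_neg ht]
        rw [mainInv tl (i + 1) (some p) acc hne]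
        dsimp only
        cases hf : firstT tl (i + 1) tl.length with
        | some k =>
          rw [scanA_some tl tl.length p (i + 1) acc k hf,
            scanA_some tl tl.length p i acc k (hstep.trans hf)]
        | none =>
          rw [scanA_none tl tl.length p (i + 1) acc hf,
            scanA_none tl tl.length p i acc (hstep.trans hf)]
  · have hd : tl.drop i = [] := List.drop_eq_nil_of_le (by omega)
    rw [hd, goB]
    match st with
    | none =>
      dsimp only
      simp only [finishB]
      conv_rhs => rw [loopA]
      rw [dif_neg (show ¬ (i + 1 < tl.length) from by omega)]
    | some p =>
      dsimp only
      simp only [finishB]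
      rw [scanA_none tl tl.length p i acc
        (by rw [firstT, if_neg (show ¬ i < tl.length from by omega)])]
      rw [getLastD_eq_getD tl hne]
termination_by tl.length - i
decreasing_by all_goals omega

-- ===== VERDICT (by name: the statement is the Claim_ definition above) =====
theorem find_continue_list_spec : Claim_equal_find_continue_list := by
  intro tl _
  unfold Spec_find_continue_list find_continue_list find_continue_list_alt
  by_cases h : tl = []
  · simp [h]
  · simp only [h, if_neg, not_false_iff]
    have := mainInv tl 0 none [] h
    simp only [List.drop_zero] at this
    rcases hg : goB tl tl.length tl 0 [] none with ⟨res, pending⟩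
    rw [hg] at this
    match pending with
    | none => simp only [finishB] at this; rw [← this]
    | some p => simp only [finishB] at this; rw [← this]
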